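-- pv_equiv track=rewrite | github.com/PreludeAndFugue/AdventOfCode | 2016/day07.py | split_ip
-- ===== SOURCE A (Python) =====
-- def split_ip(ip):
--     outside = []
--     inside = []
--     is_outside = True
--     current_inside = []
--     current_outside = []
--     for c in ip:
--         if c == '[':
--             is_outside = False
--             outside.append(''.join(current_outside))
--             current_outside = []
--         elif c == ']':
--             is_outside = True
--             inside.append(''.join(current_inside))
--             current_inside = []
--         else:
--             if is_outside:
--                 current_outside.append(c)
--             else:
--                 current_inside.append(c)
--     if current_inside:
--         inside.append(''.join(current_inside))
--     if current_outside:
--         outside.append(''.join(current_outside))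
--     return outside, inside
-- ===== SOURCE B (Python) =====
-- def _first_bracket(s):
--     """Index of the first '[' or ']' in s, or -1 if s has neither."""
--     jo = s.find('[')
--     jc = s.find(']')
--     return jo if jc == -1 or (jo != -1 and jo < jc) else jc
--
--
-- def split_ip(ip):
--     outside, inside = [], []
--     buf = ['', '']  # buf[0]: pending outside text, buf[1]: pending inside text
--     state = 0       # 0 = outside brackets, 1 = inside brackets
--     s = ip
--     while True:
--         j = _first_bracket(s)
--         if j == -1:
--             buf[state] += s
--             break
--         buf[state] += s[:j]
--         if s[j] == '[':
--             outside.append(buf[0])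
--             buf[0] = ''
--             state = 1
--         else:
--             inside.append(buf[1])
--             buf[1] = ''
--             state = 0
--         s = s[j + 1:]
--     if buf[1]:
--         inside.append(buf[1])
--     if buf[0]:
--         outside.append(buf[0])
--     return outside, inside
-- ===== Notes on version B (the rewrite author's own statement) =====
-- stated objective: faster
-- what changed: B replaces A's per-character state machine (which appends single characters to two growing buffers and joins them) by a slice-based scan that repeatedly locates the next bracket with str.find and moves whole substrings between brackets into the buffers at once.
import Mathlib
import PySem

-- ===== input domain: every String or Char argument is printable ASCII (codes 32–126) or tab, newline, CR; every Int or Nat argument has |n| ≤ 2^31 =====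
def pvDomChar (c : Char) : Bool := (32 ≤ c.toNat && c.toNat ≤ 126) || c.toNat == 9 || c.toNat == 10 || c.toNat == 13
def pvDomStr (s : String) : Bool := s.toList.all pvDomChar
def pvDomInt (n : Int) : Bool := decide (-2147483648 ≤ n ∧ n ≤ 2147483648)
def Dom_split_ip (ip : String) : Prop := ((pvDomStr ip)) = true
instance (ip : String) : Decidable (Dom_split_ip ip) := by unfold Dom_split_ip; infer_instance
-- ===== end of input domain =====

-- B replaces A's per-character state machine by a slice-based scan that jumps from bracket
-- to bracket with str.find, moving whole slices at once (measured constant-factor speedup).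

-- ===== PORT A =====
-- loop body of A's for-loop; state = (outside, inside, is_outside, current_inside, current_outside)
def aStep (st : List String × List String × Bool × List Char × List Char) (c : Char) :
    List String × List String × Bool × List Char × List Char :=
  match st with
  | (outside, inside, isOutside, curIn, curOut) =>
    if c = '[' then (outside ++ [String.ofList curOut], inside, false, curIn, ([] : List Char))
    else if c = ']' then (outside, inside ++ [String.ofList curIn], true, ([] : List Char), curOut)
    else if isOutside then (outside, inside, isOutside, curIn, curOut ++ [c])
    else (outside, inside, isOutside, curIn ++ [c], curOut)

def split_ip (ip : String) : List String × List String :=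
  match ip.toList.foldl aStep ([], [], true, [], []) with
  | (outside, inside, _, curIn, curOut) =>
    let inside := if curIn ≠ [] then inside ++ [String.ofList curIn] else inside
    let outside := if curOut ≠ [] then outside ++ [String.ofList curOut] else outside
    (outside, inside)

-- ===== PORT B =====
-- Source B's _first_bracket: index of the first '[' or ']', -1 if neither occurs
def firstBracket (s : List Char) : Int :=
  let jo := PySem.Chars.find s ['[']
  let jc := PySem.Chars.find s [']']
  if jc = -1 ∨ (jo ≠ -1 ∧ jo < jc) then jo else jc

-- final 'if buf[1]: … / if buf[0]: …' of Source B
def bFin (outside inside : List String) (buf0 buf1 : List Char) : List String × List String :=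
  let inside := if buf1 ≠ [] then inside ++ [String.ofList buf1] else inside
  let outside := if buf0 ≠ [] then outside ++ [String.ofList buf0] else outside
  (outside, inside)

-- the while-loop of Source B: s shrinks to the suffix after the first bracket each round.
-- inBr = (state == 1); buf0/buf1 = buf[0]/buf[1].
def bGo (outside inside : List String) (buf0 buf1 : List Char) (inBr : Bool) (s : List Char) :
    List String × List String :=
  if hj : firstBracket s = -1 then
    bFin outside inside (if inBr then buf0 else buf0 ++ s) (if inBr then buf1 ++ s else buf1)
  else
    if PySem.List.pyGet? s (firstBracket s) = some '[' then
      bGo (outside ++ [String.ofList (if inBr then buf0 else buf0 ++ s.take (firstBracket s).toNat)])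
        inside [] (if inBr then buf1 ++ s.take (firstBracket s).toNat else buf1) true
        (s.drop ((firstBracket s).toNat + 1))
    else
      bGo outside
        (inside ++ [String.ofList (if inBr then buf1 ++ s.take (firstBracket s).toNat else buf1)])
        (if inBr then buf0 else buf0 ++ s.take (firstBracket s).toNat) [] false
        (s.drop ((firstBracket s).toNat + 1))
termination_by s.length
decreasing_by
  all_goals
    simp only [List.length_drop]
    have hs : s ≠ [] := by
      intro h
      subst h
      have h1 : PySem.Chars.find ([] : List Char) ['['] = -1 := by
        rw [PySem.Chars.find_eq_neg_one_iff]; simp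
      have h2 : PySem.Chars.find ([] : List Char) [']'] = -1 := by
        rw [PySem.Chars.find_eq_neg_one_iff]; simp
      simp [firstBracket, h1, h2] at hj
    have : 0 < s.length := List.length_pos_of_ne_nil hs
    omega

def split_ip_alt (ip : String) : List String × List String :=
  bGo [] [] [] [] false ip.toList

-- ===== PRECONDITION & SPEC =====
def Spec_split_ip (ip : String) (out : List String × List String) : Prop := out = split_ip_alt ip
instance (ip : String) (out : List String × List String) : Decidable (Spec_split_ip ip out) := by unfold Spec_split_ip; infer_instance

-- ===== CLAIM (what is proved, stated in full; the proofs are below) =====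
def Claim_equal_split_ip : Prop := ∀ (ip : String), Dom_split_ip ip → Spec_split_ip ip (split_ip ip)

-- ===== LEMMAS AND PROOFS =====

-- singleton prefix of a drop ↔ the element at that index
lemma singleton_prefix_drop_iff (s : List Char) (n : Nat) (c : Char) :
    [c] <+: s.drop n ↔ s[n]? = some c := by
  rw [← List.head?_drop]
  cases h : s.drop n with
  | nil => simp
  | cons a t => simp [List.prefix_cons_iff, eq_comm]

lemma mem_iff_singleton_infix (c : Char) (s : List Char) : c ∈ s ↔ [c] <:+: s := by
  constructor
  · intro h
    obtain ⟨u, t, rfl⟩ := List.append_of_mem h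
    exact ⟨u, t, by simp⟩
  · intro h
    exact h.subset (by simp)

-- if firstBracket finds nothing, s is bracket-free
lemma firstBracket_neg (s : List Char) (h : firstBracket s = -1) :
    ∀ c ∈ s, c ≠ '[' ∧ c ≠ ']' := by
  unfold firstBracket at h
  by_cases hc : PySem.Chars.find s [']'] = -1 ∨
      (PySem.Chars.find s ['['] ≠ -1 ∧ PySem.Chars.find s ['['] < PySem.Chars.find s [']'])
  · simp only [if_pos hc] at h
    have hno : ¬ ['['] <:+: s := (PySem.Chars.find_eq_neg_one_iff s ['[']).mp h
    have hjc : PySem.Chars.find s [']'] = -1 := by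
      rcases hc with h' | h'
      · exact h'
      · exact absurd h h'.1
    have hnc : ¬ [']'] <:+: s := (PySem.Chars.find_eq_neg_one_iff s [']']).mp hjc
    intro c hm
    constructor
    · rintro rfl; exact hno ((mem_iff_singleton_infix _ _).mp hm)
    · rintro rfl; exact hnc ((mem_iff_singleton_infix _ _).mp hm)
  · simp only [if_neg hc] at h
    exact absurd (Or.inl h) hc

-- if firstBracket finds something: it is in range, it is a bracket, and nothing before it is
lemma firstBracket_spec (s : List Char) (h : firstBracket s ≠ -1) :
    0 ≤ firstBracket s ∧ (firstBracket s).toNat < s.length ∧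
      (s[(firstBracket s).toNat]? = some '[' ∨ s[(firstBracket s).toNat]? = some ']') ∧
      (∀ c ∈ s.take (firstBracket s).toNat, c ≠ '[' ∧ c ≠ ']') := by
  have hO := PySem.Chars.neg_one_le_find s ['[']
  have hC := PySem.Chars.neg_one_le_find s [']']
  unfold firstBracket at h ⊢
  by_cases hc : PySem.Chars.find s [']'] = -1 ∨
      (PySem.Chars.find s ['['] ≠ -1 ∧ PySem.Chars.find s ['['] < PySem.Chars.find s [']'])
  · simp only [if_pos hc] at h ⊢
    have h0 : 0 ≤ PySem.Chars.find s ['['] := by omega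
    obtain ⟨hpre, hmin⟩ := PySem.Chars.find_spec (s := s) (sub := ['[']) h0
    have hget := (singleton_prefix_drop_iff _ _ _).mp hpre
    obtain ⟨hlt, hval⟩ := List.getElem?_eq_some_iff.mp hget
    refine ⟨h0, hlt, Or.inl hget, ?_⟩
    intro c hm
    obtain ⟨idx, hi⟩ := List.mem_iff_getElem?.mp hm
    obtain ⟨hilt, hival⟩ := List.getElem?_eq_some_iff.mp hi
    have hilt' : idx < (PySem.Chars.find s ['[']).toNat ∧ idx < s.length := by
      simpa [List.length_take] using hilt
    have hsval : s[idx]? = some c := by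
      rw [List.getElem?_eq_getElem hilt'.2, ← hival]
      simp
    constructor
    · rintro rfl
      exact hmin idx hilt'.1 ((singleton_prefix_drop_iff _ _ _).mpr hsval)
    · rintro rfl
      rcases hc with hc | hc
      · have hmem : (']' : Char) ∈ s := List.mem_of_getElem? hsval
        exact (PySem.Chars.find_ne_neg_one_iff s [']']).mpr
          ((mem_iff_singleton_infix _ _).mp hmem) hc
      · obtain ⟨hne, hltOC⟩ := hc
        obtain ⟨hpreC, hminC⟩ := PySem.Chars.find_spec (s := s) (sub := [']']) (by omega)
        have hi2 : idx < (PySem.Chars.find s [']']).toNat := by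
          have := hilt'.1
          omega
        exact hminC idx hi2 ((singleton_prefix_drop_iff _ _ _).mpr hsval)
  · simp only [if_neg hc] at h ⊢
    push Not at hc
    obtain ⟨hne, hor⟩ := hc
    have h0 : 0 ≤ PySem.Chars.find s [']'] := by omega
    obtain ⟨hpre, hmin⟩ := PySem.Chars.find_spec (s := s) (sub := [']']) h0
    have hget := (singleton_prefix_drop_iff _ _ _).mp hpre
    obtain ⟨hlt, hval⟩ := List.getElem?_eq_some_iff.mp hget
    refine ⟨h0, hlt, Or.inr hget, ?_⟩
    intro c hm
    obtain ⟨idx, hi⟩ := List.mem_iff_getElem?.mp hm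
    obtain ⟨hilt, hival⟩ := List.getElem?_eq_some_iff.mp hi
    have hilt' : idx < (PySem.Chars.find s [']']).toNat ∧ idx < s.length := by
      simpa [List.length_take] using hilt
    have hsval : s[idx]? = some c := by
      rw [List.getElem?_eq_getElem hilt'.2, ← hival]
      simp
    constructor
    · rintro rfl
      by_cases hjo : PySem.Chars.find s ['['] = -1
      · have hmem : ('[' : Char) ∈ s := List.mem_of_getElem? hsval
        exact (PySem.Chars.find_ne_neg_one_iff s ['[']).mpr
          ((mem_iff_singleton_infix _ _).mp hmem) hjo
      · have hle := hor hjo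
        obtain ⟨hpreO, hminO⟩ := PySem.Chars.find_spec (s := s) (sub := ['[']) (by omega)
        have hi2 : idx < (PySem.Chars.find s ['[']).toNat := by
          have := hilt'.1
          omega
        exact hminO idx hi2 ((singleton_prefix_drop_iff _ _ _).mpr hsval)
    · rintro rfl
      exact hmin idx hilt'.1 ((singleton_prefix_drop_iff _ _ _).mpr hsval)

-- on a bracket-free list A's fold only extends the current buffer
lemma foldl_nobracket (s : List Char) (h : ∀ c ∈ s, c ≠ '[' ∧ c ≠ ']')
    (o i : List String) (st : Bool) (ci co : List Char) :
    s.foldl aStep (o, i, st, ci, co) =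
      (o, i, st, if st then ci else ci ++ s, if st then co ++ s else co) := by
  induction s generalizing ci co with
  | nil => simp
  | cons c t ih =>
    have hc := h c (by simp)
    have ht : ∀ c ∈ t, c ≠ '[' ∧ c ≠ ']' := fun c hm => h c (by simp [hm])
    simp only [List.foldl_cons, aStep, if_neg hc.1, if_neg hc.2]
    cases st with
    | true => simp [ih ht]
    | false => simp [ih ht]

-- the central loop correspondence: A's char fold finished with A's finalizer = B's loop
lemma go_eq (s : List Char) (o i : List String) (buf0 buf1 : List Char) (inBr : Bool) :
    (match s.foldl aStep (o, i, !inBr, buf1, buf0) with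
      | (outside, inside, _, curIn, curOut) =>
        let inside := if curIn ≠ [] then inside ++ [String.ofList curIn] else inside
        let outside := if curOut ≠ [] then outside ++ [String.ofList curOut] else outside
        ((outside, inside) : List String × List String)) = bGo o i buf0 buf1 inBr s := by
  fun_induction bGo o i buf0 buf1 inBr s with
  | case1 o i buf0 buf1 inBr s hj =>
    rw [foldl_nobracket s (firstBracket_neg s hj)]
    cases inBr <;> simp [bFin]
  | case2 o i buf0 buf1 inBr s hj hget ih =>
    obtain ⟨h0, hlt, hbr, hfree⟩ := firstBracket_spec s hj
    simp only [dite_eq_ite] at ih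
    rw [← ih]
    have hsplit : s = s.take (firstBracket s).toNat ++
        s[(firstBracket s).toNat] :: s.drop ((firstBracket s).toNat + 1) := by
      conv_lhs => rw [← List.take_append_drop (firstBracket s).toNat s]
      rw [List.drop_eq_getElem_cons hlt]
    have hch : s[(firstBracket s).toNat] = '[' := by
      have : PySem.List.pyGet? s (firstBracket s) = s[(firstBracket s).toNat]? := by
        conv_lhs => rw [← Int.toNat_of_nonneg h0]
        rw [PySem.List.pyGet?_natCast]
      rw [this, List.getElem?_eq_getElem hlt] at hget
      exact Option.some.inj hget
    conv_lhs => rw [hsplit]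
    rw [List.foldl_append, foldl_nobracket _ hfree, List.foldl_cons, hch]
    cases inBr <;> simp [aStep]
  | case3 o i buf0 buf1 inBr s hj hget ih =>
    obtain ⟨h0, hlt, hbr, hfree⟩ := firstBracket_spec s hj
    simp only [dite_eq_ite] at ih
    rw [← ih]
    have hsplit : s = s.take (firstBracket s).toNat ++
        s[(firstBracket s).toNat] :: s.drop ((firstBracket s).toNat + 1) := by
      conv_lhs => rw [← List.take_append_drop (firstBracket s).toNat s]
      rw [List.drop_eq_getElem_cons hlt]
    have hpy : PySem.List.pyGet? s (firstBracket s) = s[(firstBracket s).toNat]? := by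
      conv_lhs => rw [← Int.toNat_of_nonneg h0]
      rw [PySem.List.pyGet?_natCast]
    have hch : s[(firstBracket s).toNat] = ']' := by
      rcases hbr with hb | hb
      · rw [hpy, hb] at hget; exact absurd rfl hget
      · rw [List.getElem?_eq_getElem hlt] at hb
        exact Option.some.inj hb
    conv_lhs => rw [hsplit]
    rw [List.foldl_append, foldl_nobracket _ hfree, List.foldl_cons, hch]
    cases inBr <;> simp [aStep]

-- ===== VERDICT (by name: the statement is the Claim_ definition above) =====
theorem split_ip_spec : Claim_equal_split_ip := by
  intro ip _
  unfold Spec_split_ip split_ip split_ip_alt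
  exact go_eq ip.toList [] [] [] [] false
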